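-- pv_equiv track=rewrite | github.com/Kekhet/IP_calculator | IP_Calculator.py | maxHost
-- ===== SOURCE A (Python) =====
-- def maxHost(mask):
--     expo = 32 - mask
--     mult = 1
--     while expo > 0:
--         mult *= 2
--         expo -= 1
--     mult -= 2
--     return mult
-- ===== SOURCE B (Python) =====
-- def maxHost(mask):
--     return (1 << max(32 - mask, 0)) - 2
-- ===== Notes on version B (the rewrite author's own statement) =====
-- stated objective: simpler
-- what changed: Replaced the doubling while-loop with the closed form (1 << max(32-mask, 0)) - 2, where the max clamps the exponent to 0 exactly as the loop's guard does.
import Mathlib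
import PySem

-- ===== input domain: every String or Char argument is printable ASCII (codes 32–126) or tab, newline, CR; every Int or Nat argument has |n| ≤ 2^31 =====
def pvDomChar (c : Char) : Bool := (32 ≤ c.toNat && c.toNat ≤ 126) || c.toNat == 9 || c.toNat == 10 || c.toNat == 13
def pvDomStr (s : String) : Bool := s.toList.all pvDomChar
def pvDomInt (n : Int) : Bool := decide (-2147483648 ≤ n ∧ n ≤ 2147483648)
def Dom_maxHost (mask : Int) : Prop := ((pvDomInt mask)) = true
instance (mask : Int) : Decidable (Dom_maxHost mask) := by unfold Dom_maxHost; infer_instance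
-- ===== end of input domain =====

-- B replaces A's doubling while-loop by the closed form (1 <<< max (32-mask) 0) - 2 (objective: simpler).

-- ===== PORT A =====
-- the 'while expo > 0: mult *= 2; expo -= 1' loop, step for step
def maxHostLoop (expo mult : Int) : Int :=
  if expo > 0 then maxHostLoop (expo - 1) (mult * 2) else mult
termination_by expo.toNat
decreasing_by
  have h : expo > 0 := by assumption
  omega

def maxHost (mask : Int) : Int :=
  maxHostLoop (32 - mask) 1 - 2

-- ===== PORT B =====
def maxHost_alt (mask : Int) : Int :=
  ((1 : Int) <<< (max (32 - mask) 0).toNat) - 2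

-- ===== PRECONDITION & SPEC =====
def Spec_maxHost (mask : Int) (out : Int) : Prop := out = maxHost_alt mask
instance (mask : Int) (out : Int) : Decidable (Spec_maxHost mask out) := by unfold Spec_maxHost; infer_instance

-- ===== CLAIM (what is proved, stated in full; the proofs are below) =====
def Claim_equal_maxHost : Prop := ∀ (mask : Int), Dom_maxHost mask → Spec_maxHost mask (maxHost mask)

-- ===== LEMMAS AND PROOFS =====
theorem maxHostLoop_eq (e m : Int) : maxHostLoop e m = m * 2 ^ e.toNat := by
  by_cases h : e > 0
  · rw [maxHostLoop]
    simp only [h, if_true]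
    have ih := maxHostLoop_eq (e - 1) (m * 2)
    rw [ih]
    have : e.toNat = (e - 1).toNat + 1 := by omega
    rw [this, pow_succ]
    ring
  · rw [maxHostLoop]
    have h0 : e.toNat = 0 := by omega
    simp [h, h0]
termination_by e.toNat
decreasing_by omega

-- ===== VERDICT (by name: the statement is the Claim_ definition above) =====
theorem maxHost_spec : Claim_equal_maxHost := by
  intro mask _
  unfold Spec_maxHost maxHost maxHost_alt
  rw [maxHostLoop_eq]
  have h1 : (max (32 - mask) 0).toNat = (32 - mask).toNat := by omega
  rw [h1, Int.shiftLeft_eq, one_mul]
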